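-- pv_equiv track=rewrite | github.com/anu-coder/Intensive-python | exercises/swapping_elements.py | swap_elements
-- ===== SOURCE A (Python) =====
-- def swap_elements(lst: list):
--     """ Return the list after swapping the biggest integer in the list
--     with the one at the last position.
--
--     >>> swap_elements([3, 4, 2, 2, 43, 7])
--     >>> [3, 4, 2, 2, 7, 43]
--     """
--     lst = lst.copy()
--
--     max_num = lst[0]
--     i_max = 0
--
--
--     i=0
--     for n in lst:
--         if n >= max_num:
--             max_num = n
--             i_max = i
--
--         i += 1
--
--     lst[-1], lst[i_max] = lst[i_max], lst[-1]
--
--     return(lst)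
-- ===== SOURCE B (Python) =====
-- def swap_elements(lst: list):
--     out = lst.copy()
--     last = out[-1]                      # IndexError on empty, like the original
--     m = max(out)
--     i = len(out) - 1 - out[::-1].index(m)   # last occurrence of the maximum
--     out[-1] = out[i]
--     out[i] = last
--     return out
-- ===== Notes on version B (the rewrite author's own statement) =====
-- stated objective: alternative
-- what changed: Instead of one left-to-right fold that tracks a running maximum and its last index with a manual counter, B computes max(lst) with the builtin and finds the last occurrence by searching the reversed list, then swaps; same O(n) cost, different decomposition.
import Mathlib
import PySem

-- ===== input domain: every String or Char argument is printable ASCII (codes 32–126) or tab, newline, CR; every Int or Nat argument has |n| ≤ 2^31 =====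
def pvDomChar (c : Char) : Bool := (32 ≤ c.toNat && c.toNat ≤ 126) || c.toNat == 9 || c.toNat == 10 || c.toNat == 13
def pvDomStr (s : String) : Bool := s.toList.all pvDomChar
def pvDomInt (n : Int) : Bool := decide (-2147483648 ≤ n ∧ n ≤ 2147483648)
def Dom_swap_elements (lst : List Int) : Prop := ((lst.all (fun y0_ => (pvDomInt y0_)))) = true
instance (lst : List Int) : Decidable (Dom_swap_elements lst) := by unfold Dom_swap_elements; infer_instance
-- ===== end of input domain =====

-- B swaps the last occurrence of max(lst) (found by searching the reversed list) with the last
-- element, instead of A's single fold tracking a running maximum, its index and a counter;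
-- same O(n) cost, different decomposition. Neither program mutates its argument (both copy first).

-- ===== PORT A =====
-- loop body of A: state (max_num, i_max, i)
def swapStepA (s : Int × Int × Int) (n : Int) : Int × Int × Int :=
  if n ≥ s.1 then (n, s.2.2, s.2.2 + 1) else (s.1, s.2.1, s.2.2 + 1)

def swap_elements (lst : List Int) : List Int :=
  match PySem.List.pyGet? lst 0 with
  | none => []          -- lst[0] raises IndexError (empty list); excluded by Pre_
  | some h =>
    let s := lst.foldl swapStepA (h, 0, 0)
    let i_max := s.2.1
    -- lst[-1], lst[i_max] = lst[i_max], lst[-1]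
    let tmp : Int × Int := (PySem.List.pyGetD lst i_max 0, PySem.List.pyGetD lst (-1) 0)
    let lst1 := PySem.List.pySetD lst (-1) tmp.1
    PySem.List.pySetD lst1 i_max tmp.2

-- ===== PORT B =====
def swap_elements_alt (lst : List Int) : List Int :=
  match PySem.List.pyGet? lst (-1) with
  | none => []          -- out[-1] raises IndexError (empty list); excluded by Pre_
  | some last =>
    match PySem.List.max? lst (fun x => x) with
    | none => []        -- unreachable: lst is nonempty here
    | some m =>
      let rev := (PySem.List.slice? lst none none (-1)).getD []   -- out[::-1]
      match PySem.List.index? rev m with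
      | none => []      -- unreachable: m ∈ lst
      | some k =>
        let i : Int := (lst.length : Int) - 1 - (k : Int)
        let out1 := PySem.List.pySetD lst (-1) (PySem.List.pyGetD lst i 0)
        PySem.List.pySetD out1 i last

-- ===== PRECONDITION & SPEC =====
-- Pre_ excludes exactly the empty list, on which the Python A raises IndexError at its first subscript.
def Pre_swap_elements (lst : List Int) : Prop := lst ≠ []
instance (lst : List Int) : Decidable (Pre_swap_elements lst) := by unfold Pre_swap_elements; infer_instance
def pvWitness_swap_elements : List Int := [3, 4, 2, 2, 43, 7]

def Spec_swap_elements (lst : List Int) (out : List Int) : Prop := out = swap_elements_alt lst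
instance (lst : List Int) (out : List Int) : Decidable (Spec_swap_elements lst out) := by unfold Spec_swap_elements; infer_instance

-- ===== CLAIM (what is proved, stated in full; the proofs are below) =====
def Claim_equal_swap_elements : Prop := ∀ (lst : List Int), Dom_swap_elements lst → Pre_swap_elements lst → Spec_swap_elements lst (swap_elements lst)

-- ===== LEMMAS AND PROOFS =====

-- the maximum computed by a running-max fold started at the head is an element of the list
theorem foldl_max_mem (ys : List Int) (h : Int) (hh : ys.head? = some h) :
    ys.foldl max h ∈ ys := by
  obtain ⟨x, t, rfl⟩ := List.exists_cons_of_ne_nil (show ys ≠ [] by rintro rfl; simp at hh)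
  have hx : x = h := by simpa using hh
  subst hx
  have : (x :: t).foldl max x = t.foldl max x := by simp [List.foldl_cons]
  rw [this]
  exact PySem.List.max?_mem (PySem.List.max?_id_cons x t)

-- A's fold computes (max of xs, index of the LAST occurrence of that max, length of xs),
-- where the last-occurrence index is expressed the way B computes it (search in the reverse).
theorem swapStepA_fold_key (xs : List Int) (h : Int) (hh : xs.head? = some h) :
    xs.foldl swapStepA (h, 0, 0) =
      (xs.foldl max h,
       ((xs.length : Int) - 1 - (((PySem.List.index? xs.reverse (xs.foldl max h)).getD 0 : Nat) : Int),
        (xs.length : Int))) := by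
  induction xs using List.reverseRecOn with
  | nil => simp at hh
  | append_singleton ys y ih =>
    rcases eq_or_ne ys [] with rfl | hys
    · have hy : y = h := by simpa using hh
      subst hy
      simp [swapStepA]
    · have hh' : ys.head? = some h := by
        rwa [List.head?_append_of_ne_nil _ hys] at hh
      have hMmem : ys.foldl max h ∈ ys := foldl_max_mem ys h hh'
      rw [List.foldl_append, ih hh', List.foldl_append, List.reverse_append]
      simp only [List.foldl_cons, List.foldl_nil, List.reverse_singleton,
        List.singleton_append, List.length_append, List.length_singleton]
      by_cases hy : y ≥ ys.foldl max h
      · rw [max_eq_right hy, PySem.List.index?_cons_self]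
        simp [swapStepA, hy]
      · have hne : y ≠ ys.foldl max h := fun e => hy (ge_of_eq e)
        rw [max_eq_left (not_le.mp hy).le, PySem.List.index?_cons_of_ne _ hne]
        obtain ⟨k, hk⟩ := Option.isSome_iff_exists.mp
          ((PySem.List.index?_isSome_iff ys.reverse _).mpr (List.mem_reverse.mpr hMmem))
        rw [hk]
        simp [swapStepA, hy]
        omega

theorem swap_elements_eq_alt (lst : List Int) (hpre : lst ≠ []) :
    swap_elements lst = swap_elements_alt lst := by
  obtain ⟨x, t, rfl⟩ := List.exists_cons_of_ne_nil hpre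
  have hmax : (x :: t).foldl max x = t.foldl max x := by simp [List.foldl_cons]
  have hMmem : (x :: t).foldl max x ∈ x :: t := foldl_max_mem _ x rfl
  obtain ⟨k, hk⟩ := Option.isSome_iff_exists.mp
    ((PySem.List.index?_isSome_iff (x :: t).reverse _).mpr (List.mem_reverse.mpr hMmem))
  obtain ⟨last, hlast⟩ : ∃ y, (x :: t).getLast? = some y := by
    cases e : (x :: t).getLast? with
    | none => simp at e
    | some y => exact ⟨y, rfl⟩
  unfold swap_elements swap_elements_alt
  rw [PySem.List.pyGet?_zero_cons, PySem.List.pyGet?_neg_one, hlast,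
      PySem.List.max?_id_cons, PySem.List.slice?_none_none_neg_one]
  simp only [Option.getD_some]
  rw [← hmax, hk, swapStepA_fold_key (x :: t) x rfl, hk]
  simp only [Option.getD_some]
  have hlastD : PySem.List.pyGetD (x :: t) (-1) 0 = last := by
    rw [PySem.List.pyGetD_neg_one (x :: t) 0 (List.cons_ne_nil x t)]
    have := List.getLast?_eq_some_getLast (List.cons_ne_nil x t)
    rw [this] at hlast
    exact (Option.some_inj.mp hlast)
  rw [hlastD]

-- ===== VERDICT (by name: the statement is the Claim_ definition above) =====
theorem swap_elements_spec : Claim_equal_swap_elements := by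
  intro lst _ hpre
  unfold Spec_swap_elements
  exact swap_elements_eq_alt lst hpre
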